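-- pv_equiv track=rewrite | github.com/esun-ai/phonetic_mlm | src/evaluation_func.py | _trans_trace_from_start
-- ===== SOURCE A (Python) =====
-- def _trans_trace_from_start(executions):
--     adj_num = 0
--     adj_executions = []
--     for idx, exe, ref, hyp in executions[::-1]:
--         idx += adj_num
--         if exe == 'insertion':
--             adj_num += 1
--         elif exe == 'deletion':
--             adj_num -= 1
--         adj_executions.append((idx, exe, ref, hyp))
--     return adj_executions
-- ===== SOURCE B (Python) =====
-- def _trans_trace_from_start(executions):
--     rev = executions[::-1]
--     deltas = [1 if exe == 'insertion' else -1 if exe == 'deletion' else 0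
--               for _, exe, _, _ in rev]
--     offsets = [0] * len(rev)
--     s = 0
--     for i, d in enumerate(deltas):
--         offsets[i] = s
--         s += d
--     return [(idx + off, exe, ref, hyp)
--             for (idx, exe, ref, hyp), off in zip(rev, offsets)]
-- ===== Notes on version B (the rewrite author's own statement) =====
-- stated objective: alternative
-- what changed: The single interleaved loop with a mutating counter is split into three passes: build a +1/-1/0 delta table, turn it into an exclusive prefix-sum offset table, then zip the reversed trace with its offsets to emit the adjusted tuples.
import Mathlib
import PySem

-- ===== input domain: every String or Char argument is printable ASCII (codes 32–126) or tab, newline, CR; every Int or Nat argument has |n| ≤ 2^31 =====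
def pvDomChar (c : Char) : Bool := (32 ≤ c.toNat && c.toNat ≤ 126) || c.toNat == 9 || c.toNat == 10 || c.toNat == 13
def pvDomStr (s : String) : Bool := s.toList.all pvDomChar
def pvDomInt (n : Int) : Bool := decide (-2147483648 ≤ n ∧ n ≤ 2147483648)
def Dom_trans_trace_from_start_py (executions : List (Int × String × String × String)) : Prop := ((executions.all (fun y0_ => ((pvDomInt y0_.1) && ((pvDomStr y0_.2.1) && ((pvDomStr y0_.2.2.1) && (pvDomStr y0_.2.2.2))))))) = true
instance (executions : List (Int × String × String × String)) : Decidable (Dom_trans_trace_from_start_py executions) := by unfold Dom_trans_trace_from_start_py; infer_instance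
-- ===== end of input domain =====

-- ===== PORT A =====
-- One honest line: B replaces A's interleaved loop (running counter mutated while emitting)
-- by three passes — a delta table, an exclusive prefix-sum offset table, and a zip/apply pass.
def trans_trace_from_start_py (executions : List (Int × String × String × String)) : List (Int × String × String × String) :=
  -- literal port of A: fold over executions[::-1] carrying (adj_num, adj_executions)
  (executions.reverse.foldl
    (fun (st : Int × List (Int × String × String × String)) x =>
      let idx := x.1 + st.1
      let adj := if x.2.1 == "insertion" then st.1 + 1
                 else if x.2.1 == "deletion" then st.1 - 1
                 else st.1
      (adj, st.2 ++ [(idx, x.2.1, x.2.2.1, x.2.2.2)]))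
    (0, [])).2

-- ===== PORT B =====
-- B helper: the delta of one step
def pvDelta (exe : String) : Int :=
  if exe == "insertion" then 1 else if exe == "deletion" then -1 else 0

-- B helper: exclusive prefix sums of the delta list (mirrors Source B's offsets loop)
def pvOffsets (s : Int) : List Int → List Int
  | [] => []
  | d :: ds => s :: pvOffsets (s + d) ds

def trans_trace_from_start_py_alt (executions : List (Int × String × String × String)) : List (Int × String × String × String) :=
  let rev := executions.reverse
  let deltas := rev.map (fun x => pvDelta x.2.1)
  let offsets := pvOffsets 0 deltas
  (rev.zip offsets).map (fun p => (p.1.1 + p.2, p.1.2.1, p.1.2.2.1, p.1.2.2.2))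

-- ===== PRECONDITION & SPEC =====
def Spec_trans_trace_from_start_py (executions : List (Int × String × String × String)) (out : List (Int × String × String × String)) : Prop := out = trans_trace_from_start_py_alt executions
instance (executions : List (Int × String × String × String)) (out : List (Int × String × String × String)) : Decidable (Spec_trans_trace_from_start_py executions out) := by unfold Spec_trans_trace_from_start_py; infer_instance

-- ===== CLAIM (what is proved, stated in full; the proofs are below) =====
def Claim_equal_trans_trace_from_start_py : Prop := ∀ (executions : List (Int × String × String × String)), Dom_trans_trace_from_start_py executions → Spec_trans_trace_from_start_py executions (trans_trace_from_start_py executions)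

-- ===== LEMMAS AND PROOFS =====

-- loop invariant: A's fold from state (a, acc) produces acc ++ B's zip/offset output started at a
theorem pv_loop_eq (l : List (Int × String × String × String)) (a : Int)
    (acc : List (Int × String × String × String)) :
    (l.foldl
      (fun (st : Int × List (Int × String × String × String)) x =>
        let idx := x.1 + st.1
        let adj := if x.2.1 == "insertion" then st.1 + 1
                   else if x.2.1 == "deletion" then st.1 - 1
                   else st.1
        (adj, st.2 ++ [(idx, x.2.1, x.2.2.1, x.2.2.2)]))
      (a, acc)).2
    = acc ++ (l.zip (pvOffsets a (l.map (fun x => pvDelta x.2.1)))).map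
        (fun p => (p.1.1 + p.2, p.1.2.1, p.1.2.2.1, p.1.2.2.2)) := by
  induction l generalizing a acc with
  | nil => simp [pvOffsets]
  | cons h t ih =>
    simp only [List.foldl_cons, List.map_cons, pvOffsets, List.zip_cons_cons, List.map]
    rw [ih]
    simp [pvDelta]
    split_ifs <;> simp [Int.sub_eq_add_neg]

-- ===== VERDICT (by name: the statement is the Claim_ definition above) =====
theorem trans_trace_from_start_py_spec : Claim_equal_trans_trace_from_start_py := by
  intro executions _
  unfold Spec_trans_trace_from_start_py trans_trace_from_start_py trans_trace_from_start_py_alt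
  rw [pv_loop_eq]
  simp
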